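-- pv_equiv track=rewrite | github.com/alexcosta13/advent-of-code-2020 | day24.py | turn_tiles
-- ===== SOURCE A (Python) =====
-- def line_to_coord(line):
--     ew, ns = 0, 0
--     line = list(line)
--     while line:
--         x = line.pop(0)
--         if x == "e":
--             ew += 2
--         elif x == "w":
--             ew -= 2
--         else:
--             x += line.pop(0)
--             if x == "ne":
--                 ns += 1
--                 ew += 1
--             elif x == "sw":
--                 ns -= 1
--                 ew -= 1
--             elif x == "nw":
--                 ns += 1
--                 ew -= 1
--             elif x == "se":
--                 ns -= 1
--                 ew += 1
--     return ew, ns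
--
-- def count_adjacents(tile, floor):
--     black = 0
--     neighbors = [(2, 0), (-2, 0), (1, 1), (-1, 1), (1, -1), (-1, -1)]
--     for neighbor in neighbors:
--         new_tile = (tile[0] + neighbor[0], tile[1] + neighbor[1])
--         if new_tile in floor and floor[new_tile] == 1:
--             black += 1
--     return black
--
-- def art_exhibit(floor):
--     neighbors = [(2, 0), (-2, 0), (1, 1), (-1, 1), (1, -1), (-1, -1)]
--     new_floor = {}
--     for tile in floor:
--         new_floor[tile] = 0
--         for neighbor in neighbors:
--             new_tile = (tile[0] + neighbor[0], tile[1] + neighbor[1])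
--             new_floor[new_tile] = 0
--     for tile in new_floor:
--         new_floor[tile] = floor[tile] if tile in floor else 0
--     for tile in new_floor:
--         if count_adjacents(tile, floor) == 2:
--             new_floor[tile] = 1
--         elif tile in floor and (
--             count_adjacents(tile, floor) == 0 or count_adjacents(tile, floor) > 2
--         ):
--             new_floor[tile] = 0
--     new_floor = {k: v for k, v in new_floor.items() if v}
--     return new_floor
--
-- def turn_tiles(lines, days=0):
--     floor = {}
--     for line in lines:
--         ew, ns = line_to_coord(line)
--         if (ew, ns) in floor:
--             floor.pop((ew, ns), None)
--         else:
--             floor[(ew, ns)] = 1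
--     for _ in range(days):
--         floor = art_exhibit(floor)
--     return len(floor)
-- ===== SOURCE B (Python) =====
-- DELTA = {"e": (2, 0), "w": (-2, 0),
--          "ne": (1, 1), "sw": (-1, -1), "nw": (-1, 1), "se": (1, -1)}
--
-- OFFSETS = ((2, 0), (-2, 0), (1, 1), (-1, 1), (1, -1), (-1, -1))
--
--
-- def _coord(line):
--     ew, ns = 0, 0
--     i = 0
--     while i < len(line):
--         if line[i] in ("e", "w"):
--             tok = line[i]
--             i += 1
--         else:
--             tok = line[i] + line[i + 1]
--             i += 2
--         d = DELTA.get(tok)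
--         if d:
--             ew += d[0]
--             ns += d[1]
--     return ew, ns
--
--
-- def turn_tiles(lines, days=0):
--     black = set()
--     for line in lines:
--         c = _coord(line)
--         if c in black:
--             black.remove(c)
--         else:
--             black.add(c)
--     for _ in range(days):
--         counts = {}
--         for (x, y) in black:
--             for (dx, dy) in OFFSETS:
--                 n = (x + dx, y + dy)
--                 counts[n] = counts.get(n, 0) + 1
--         black = {t for t, c in counts.items()
--                  if c == 2 or (c == 1 and t in black)}
--     return len(black)
-- ===== Notes on version B (the rewrite author's own statement) =====
-- stated objective: alternative
-- what changed: B stores black tiles as a set and, each day, builds the neighbour-count table in one scatter pass over the black tiles (each black tile increments its six neighbours' counters), then forms the next black set directly from that table, replacing A's candidate-dict construction with per-candidate neighbourhood rescans (three count_adjacents calls per tile); the token parser is driven by a delta dictionary instead of an if/elif chain.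
import Mathlib
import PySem

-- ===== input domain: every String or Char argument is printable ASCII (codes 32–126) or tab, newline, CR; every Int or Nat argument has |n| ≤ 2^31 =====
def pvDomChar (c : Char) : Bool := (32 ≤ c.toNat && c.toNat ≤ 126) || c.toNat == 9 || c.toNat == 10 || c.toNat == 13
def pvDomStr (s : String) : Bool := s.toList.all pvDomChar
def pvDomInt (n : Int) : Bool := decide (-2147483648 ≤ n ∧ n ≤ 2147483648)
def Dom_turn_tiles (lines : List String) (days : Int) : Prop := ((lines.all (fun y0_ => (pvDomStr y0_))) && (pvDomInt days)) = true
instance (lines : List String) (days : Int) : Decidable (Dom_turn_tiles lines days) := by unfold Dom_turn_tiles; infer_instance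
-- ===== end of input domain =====

-- B replaces A's per-candidate neighbour rescans by one scatter pass that counts each black
-- tile's six neighbours into a dict, and stores black tiles as a set (alternative; return value only).

-- ===== PORT A =====
-- the six hex-neighbour offsets (A's local `neighbors` lists)
def neighborsA : List (Int × Int) := [(2, 0), (-2, 0), (1, 1), (-1, 1), (1, -1), (-1, -1)]

-- while line: x = line.pop(0) …  (none = IndexError from popping an empty list)
def lineToCoord : List Char → Int → Int → Option (Int × Int)
  | [], ew, ns => some (ew, ns)
  | c :: rest, ew, ns =>
    if c = 'e' then lineToCoord rest (ew + 2) ns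
    else if c = 'w' then lineToCoord rest (ew - 2) ns
    else
      match rest with
      | [] => none
      | d :: rest' =>
        let x := [c, d]
        if x = ['n', 'e'] then lineToCoord rest' (ew + 1) (ns + 1)
        else if x = ['s', 'w'] then lineToCoord rest' (ew - 1) (ns - 1)
        else if x = ['n', 'w'] then lineToCoord rest' (ew - 1) (ns + 1)
        else if x = ['s', 'e'] then lineToCoord rest' (ew + 1) (ns - 1)
        else lineToCoord rest' ew ns

def count_adjacents (tile : Int × Int) (floor : PySem.Dict (Int × Int) Int) : Int :=
  neighborsA.foldl (fun black nb =>
    if floor.contains (tile.1 + nb.1, tile.2 + nb.2) = true ∧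
        floor.getD (tile.1 + nb.1, tile.2 + nb.2) 0 = 1 then black + 1 else black) 0

def art_exhibit (floor : PySem.Dict (Int × Int) Int) : PySem.Dict (Int × Int) Int :=
  let nf1 := floor.keys.foldl (fun nf tile =>
      neighborsA.foldl (fun nf nb => nf.insert (tile.1 + nb.1, tile.2 + nb.2) 0)
        (nf.insert tile 0))
    PySem.Dict.empty
  let nf2 := nf1.keys.foldl (fun nf tile =>
      nf.insert tile (if floor.contains tile = true then floor.getD tile 0 else 0)) nf1
  let nf3 := nf2.keys.foldl (fun nf tile =>
      if count_adjacents tile floor = 2 then nf.insert tile 1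
      else if floor.contains tile = true ∧
          (count_adjacents tile floor = 0 ∨ count_adjacents tile floor > 2) then
        nf.insert tile 0
      else nf) nf2
  nf3.items.foldl (fun nf p => if p.2 ≠ 0 then nf.insert p.1 p.2 else nf) PySem.Dict.empty

def turn_tiles (lines : List String) (days : Int) : Int :=
  let floor? : Option (PySem.Dict (Int × Int) Int) :=
    lines.foldl (fun acc line => acc.bind (fun floor =>
        (lineToCoord line.toList 0 0).map (fun c =>
          if floor.contains c = true then floor.erase c else floor.insert c 1)))
      (some PySem.Dict.empty)
  match floor? with
  | none => 0
  | some floor =>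
    (((PySem.List.pyRange 0 days 1).foldl (fun f _ => art_exhibit f) floor).size : Int)

-- ===== PORT B =====
def deltaB : PySem.Dict (List Char) (Int × Int) :=
  PySem.Dict.ofList [(['e'], (2, 0)), (['w'], (-2, 0)), (['n', 'e'], (1, 1)),
    (['s', 'w'], (-1, -1)), (['n', 'w'], (-1, 1)), (['s', 'e'], (1, -1))]

def offsetsB : List (Int × Int) := [(2, 0), (-2, 0), (1, 1), (-1, 1), (1, -1), (-1, -1)]

-- Source B's index loop over the line, as consumption of the remaining characters
-- (none = IndexError from line[i + 1])
def coordB : List Char → Int → Int → Option (Int × Int)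
  | [], ew, ns => some (ew, ns)
  | c :: rest, ew, ns =>
    if c = 'e' ∨ c = 'w' then
      match deltaB.get? [c] with
      | some d => coordB rest (ew + d.1) (ns + d.2)
      | none => coordB rest ew ns
    else
      match rest with
      | [] => none
      | d :: rest' =>
        match deltaB.get? [c, d] with
        | some dl => coordB rest' (ew + dl.1) (ns + dl.2)
        | none => coordB rest' ew ns

def stepB (black : PySem.Set (Int × Int)) : PySem.Set (Int × Int) :=
  let counts : PySem.Dict (Int × Int) Int :=
    black.foldl (fun counts t =>
        offsetsB.foldl (fun counts o =>
          counts.insert (t.1 + o.1, t.2 + o.2) (counts.getD (t.1 + o.1, t.2 + o.2) 0 + 1))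
          counts)
      PySem.Dict.empty
  counts.items.foldl (fun s p =>
      if p.2 = 2 ∨ (p.2 = 1 ∧ p.1 ∈ black) then PySem.Set.add s p.1 else s)
    PySem.Set.empty

def turn_tiles_alt (lines : List String) (days : Int) : Int :=
  let black? : Option (PySem.Set (Int × Int)) :=
    lines.foldl (fun acc line => acc.bind (fun black =>
        (coordB line.toList 0 0).map (fun c =>
          if c ∈ black then PySem.Set.discard black c else PySem.Set.add black c)))
      (some PySem.Set.empty)
  match black? with
  | none => 0
  | some black =>
    (((PySem.List.pyRange 0 days 1).foldl (fun black _ => stepB black) black).length : Int)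

-- ===== PRECONDITION & SPEC =====
-- A's `line.pop(0)` raises IndexError exactly when a character that is not 'e'/'w' is left
-- as the final unpaired character, i.e. when the line's trailing run of non-'e'/'w'
-- characters has odd length; Pre_ admits the lines whose trailing run is even.
def Pre_turn_tiles (lines : List String) (_days : Int) : Prop :=
  ∀ l ∈ lines,
    (l.toList.reverse.takeWhile (fun c => decide (c ≠ 'e' ∧ c ≠ 'w'))).length % 2 = 0
instance (lines : List String) (days : Int) : Decidable (Pre_turn_tiles lines days) := by
  unfold Pre_turn_tiles; infer_instance

def pvWitness_turn_tiles : List String × Int := (["esew", "nwwswee", ""], 2)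

def Spec_turn_tiles (lines : List String) (days : Int) (out : Int) : Prop := out = turn_tiles_alt lines days
instance (lines : List String) (days : Int) (out : Int) : Decidable (Spec_turn_tiles lines days out) := by unfold Spec_turn_tiles; infer_instance

-- ===== CLAIM (what is proved, stated in full; the proofs are below) =====
def Claim_equal_turn_tiles : Prop := ∀ (lines : List String) (days : Int), Dom_turn_tiles lines days → Pre_turn_tiles lines days → Spec_turn_tiles lines days (turn_tiles lines days)

-- ===== LEMMAS AND PROOFS =====
-- the recursive form of A's tokenisation-success condition, used only inside the proofs
def wfLine : List Char → Bool
  | [] => true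
  | c :: rest =>
    if c = 'e' ∨ c = 'w' then wfLine rest
    else
      match rest with
      | [] => false
      | _ :: rest' => wfLine rest'

theorem wfLine_iff : ∀ (cs : List Char), wfLine cs = true ↔
    ((cs.reverse.takeWhile (fun c => decide (c ≠ 'e' ∧ c ≠ 'w'))).length % 2 = 0)
  | [] => by simp [wfLine]
  | c :: rest => by
    rw [wfLine.eq_def]
    dsimp only
    by_cases hc : c = 'e' ∨ c = 'w'
    · have hq : (fun c => decide (c ≠ 'e' ∧ c ≠ 'w')) c = false := by
        rcases hc with rfl | rfl <;> decide
      rw [if_pos hc, List.reverse_cons, List.takeWhile_append]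
      split_ifs with hall
      · rw [wfLine_iff rest]
        have hemp : (List.takeWhile (fun c => decide (c ≠ 'e' ∧ c ≠ 'w')) [c]) = [] := by
          rcases hc with rfl | rfl <;> simp
        rw [hemp, List.append_nil, ← hall]
      · exact wfLine_iff rest
    · rw [if_neg hc]
      have hcne : c ≠ 'e' ∧ c ≠ 'w' := by
        constructor <;> intro h <;> exact hc (by simp [h])
      have hqc : (fun c => decide (c ≠ 'e' ∧ c ≠ 'w')) c = true := by
        simp [hcne.1, hcne.2]
      match rest with
      | [] => simp [hcne.1, hcne.2]
      | d :: rest' =>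
        have hrev : (c :: d :: rest').reverse = rest'.reverse ++ [d, c] := by
          simp
        rw [hrev, List.takeWhile_append]
        split_ifs with hall
        · rw [wfLine_iff rest']
          have hlen2 : (List.takeWhile (fun c => decide (c ≠ 'e' ∧ c ≠ 'w')) [d, c]).length = 0
              ∨ (List.takeWhile (fun c => decide (c ≠ 'e' ∧ c ≠ 'w')) [d, c]).length = 2 := by
            by_cases hd : d ≠ 'e' ∧ d ≠ 'w'
            · right; simp [hd.1, hd.2, hcne.1, hcne.2]
            · left
              have hd' : ¬(¬d = 'e' ∧ ¬d = 'w') := hd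
              simp [hd']
          rw [List.length_reverse] at hall
          rw [List.length_append, List.length_reverse]
          rcases hlen2 with h0 | h0 <;> rw [h0] <;> omega
        · exact wfLine_iff rest'


theorem bfalse {x y : Char} (h : ¬ y = x) : (x == y) = false := by
  cases hxy : x == y
  · rfl
  · exact absurd (beq_iff_eq.mp hxy).symm h

theorem parser_eq : ∀ (cs : List Char) (ew ns : Int), wfLine cs = true →
    ∃ p, lineToCoord cs ew ns = some p ∧ coordB cs ew ns = some p
  | [], ew, ns, _ => ⟨(ew, ns), rfl, rfl⟩
  | c :: rest, ew, ns, h => by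
    rw [wfLine.eq_def] at h
    by_cases hc : c = 'e' ∨ c = 'w'
    · have hw : wfLine rest = true := by simpa [hc] using h
      rcases hc with hc | hc <;> subst hc
      · obtain ⟨p, h1, h2⟩ := parser_eq rest (ew + 2) ns hw
        refine ⟨p, ?_, ?_⟩
        · rw [lineToCoord.eq_def]; simpa using h1
        · have hd : deltaB.get? ['e'] = some (2, 0) := by decide
          rw [coordB.eq_def]; simpa [hd] using h2
      · obtain ⟨p, h1, h2⟩ := parser_eq rest (ew - 2) ns hw
        refine ⟨p, ?_, ?_⟩
        · rw [lineToCoord.eq_def]; simpa using h1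
        · have hd : deltaB.get? ['w'] = some (-2, 0) := by decide
          rw [coordB.eq_def]; simpa [hd] using h2
    · push Not at hc
      obtain ⟨hce, hcw⟩ := hc
      match rest with
      | [] => simp [hce, hcw] at h
      | d :: rest' =>
        have hw : wfLine rest' = true := by simpa [hce, hcw] using h
        by_cases h1 : c = 'n' ∧ d = 'e'
        · obtain ⟨rfl, rfl⟩ := h1
          obtain ⟨p, ha, hb⟩ := parser_eq rest' (ew + 1) (ns + 1) hw
          have hd : deltaB.get? ['n', 'e'] = some (1, 1) := by decide
          exact ⟨p, by rw [lineToCoord.eq_def]; simpa using ha,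
                 by rw [coordB.eq_def]; simpa [hd] using hb⟩
        · by_cases h2 : c = 's' ∧ d = 'w'
          · obtain ⟨rfl, rfl⟩ := h2
            obtain ⟨p, ha, hb⟩ := parser_eq rest' (ew - 1) (ns - 1) hw
            have hd : deltaB.get? ['s', 'w'] = some (-1, -1) := by decide
            exact ⟨p, by rw [lineToCoord.eq_def]; simpa using ha,
                   by rw [coordB.eq_def]; simpa [hd] using hb⟩
          · by_cases h3 : c = 'n' ∧ d = 'w'
            · obtain ⟨rfl, rfl⟩ := h3
              obtain ⟨p, ha, hb⟩ := parser_eq rest' (ew - 1) (ns + 1) hw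
              have hd : deltaB.get? ['n', 'w'] = some (-1, 1) := by decide
              exact ⟨p, by rw [lineToCoord.eq_def]; simpa [h1] using ha,
                     by rw [coordB.eq_def]; simpa [hd] using hb⟩
            · by_cases h4 : c = 's' ∧ d = 'e'
              · obtain ⟨rfl, rfl⟩ := h4
                obtain ⟨p, ha, hb⟩ := parser_eq rest' (ew + 1) (ns - 1) hw
                have hd : deltaB.get? ['s', 'e'] = some (1, -1) := by decide
                exact ⟨p, by rw [lineToCoord.eq_def]; simpa [h1, h2] using ha,
                       by rw [coordB.eq_def]; simpa [hd] using hb⟩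
              · obtain ⟨p, ha, hb⟩ := parser_eq rest' ew ns hw
                have hb1 : ('n' == c && 'e' == d) = false := by
                  rcases not_and_or.mp h1 with h' | h' <;> simp [bfalse h']
                have hb2 : ('s' == c && 'w' == d) = false := by
                  rcases not_and_or.mp h2 with h' | h' <;> simp [bfalse h']
                have hb3 : ('n' == c && 'w' == d) = false := by
                  rcases not_and_or.mp h3 with h' | h' <;> simp [bfalse h']
                have hb4 : ('s' == c && 'e' == d) = false := by
                  rcases not_and_or.mp h4 with h' | h' <;> simp [bfalse h']
                have hd : deltaB.get? [c, d] = none := by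
                  have hi : deltaB.items = [(['e'], ((2 : Int), (0 : Int))), (['w'], (-2, 0)), (['n', 'e'], (1, 1)),
                      (['s', 'w'], (-1, -1)), (['n', 'w'], (-1, 1)), (['s', 'e'], (1, -1))] := by decide
                  simp only [PySem.Dict.get?, hi, List.find?]
                  simp [bfalse hce, bfalse hcw, hb1, hb2, hb3, hb4]
                refine ⟨p, ?_, ?_⟩
                · rw [lineToCoord.eq_def]
                  simpa [hce, hcw, h1, h2, h3, h4] using ha
                · rw [coordB.eq_def]; simpa [hce, hcw, hd] using hb
-- generic facts about the fold shapes in the two ports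
theorem keys_foldl_pres {α : Type} (step : PySem.Dict α Int → α → PySem.Dict α Int)
    (hstep : ∀ d t, t ∈ d.keys → (step d t).keys = d.keys) :
    ∀ (l : List α) (d : PySem.Dict α Int), (∀ t ∈ l, t ∈ d.keys) →
      (l.foldl step d).keys = d.keys := by
  intro l
  induction l with
  | nil => intro d _; rfl
  | cons x xs ih =>
    intro d hl
    have hx := hstep d x (hl x (by simp))
    have := ih (step d x) (fun t ht => by rw [hx]; exact hl t (by simp [ht]))
    simp only [List.foldl_cons]
    rw [this, hx]

theorem get?_foldl_insert_fn {α : Type} [BEq α] [LawfulBEq α] (f : α → Int) :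
    ∀ (l : List α) (d : PySem.Dict α Int) (k : α),
      ((l.foldl (fun d t => d.insert t (f t)) d).get? k) =
        if k ∈ l then some (f k) else d.get? k := by
  intro l
  induction l with
  | nil => intro d k; simp
  | cons x xs ih =>
    intro d k
    simp only [List.foldl_cons]
    rw [ih]
    by_cases hk : k ∈ xs
    · simp [hk]
    · by_cases hkx : k = x
      · subst hkx
        simp [hk, PySem.Dict.get?_insert_self]
      · simp [hk, hkx, PySem.Dict.get?_insert_of_ne _ _ hkx]
theorem get?_foldl_ite2 {α : Type} [BEq α] [LawfulBEq α] (P Q : α → Prop)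
    [DecidablePred P] [DecidablePred Q] (a b : Int) :
    ∀ (l : List α) (d : PySem.Dict α Int) (k : α),
      ((l.foldl (fun d t => if P t then d.insert t a else if Q t then d.insert t b else d) d).get? k) =
        if k ∈ l ∧ P k then some a
        else if k ∈ l ∧ Q k then some b
        else d.get? k := by
  intro l
  induction l with
  | nil => intro d k; simp
  | cons x xs ih =>
    intro d k
    simp only [List.foldl_cons]
    rw [ih]
    by_cases hk : k ∈ xs
    · by_cases hP : P k
      · simp [hk, hP]
      · by_cases hQ : Q k
        · simp [hk, hP, hQ]
        · have hstep : (if P x then d.insert x a else if Q x then d.insert x b else d).get? k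
              = d.get? k := by
            split_ifs with h1 h2
            · exact PySem.Dict.get?_insert_of_ne d (k := x) (k' := k) a
                (fun (he : k = x) => hP (he.symm ▸ h1))
            · exact PySem.Dict.get?_insert_of_ne d (k := x) (k' := k) b
                (fun (he : k = x) => hQ (he.symm ▸ h2))
            · rfl
          simp [hk, hP, hQ, hstep]
    · by_cases hkx : k = x
      · subst hkx
        by_cases hP : P k
        · simp [hk, hP, PySem.Dict.get?_insert_self]
        · by_cases hQ : Q k
          · simp [hk, hP, hQ, PySem.Dict.get?_insert_self]
          · simp [hk, hP, hQ]
      · have hg : ∀ (d' : PySem.Dict α Int),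
            ((if P x then d.insert x a else if Q x then d.insert x b else d).get? k) = d.get? k := by
          intro _
          split_ifs <;> simp [PySem.Dict.get?_insert_of_ne _ _ hkx]
        simp only [hk, false_and, if_neg, not_false_iff]
        simp [hk, hkx, hg d]

theorem items_foldl_cond_insert_fresh {α : Type} [BEq α] [LawfulBEq α]
    (C : α × Int → Prop) [DecidablePred C] :
    ∀ (l : List (α × Int)) (d : PySem.Dict α Int),
      (∀ p ∈ l, d.contains p.1 = false) → (l.map Prod.fst).Nodup →
      (l.foldl (fun d p => if C p then d.insert p.1 p.2 else d) d).items =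
        d.items ++ l.filter (fun p => decide (C p)) := by
  intro l
  induction l with
  | nil => intro d _ _; simp
  | cons p l ih =>
    intro d hfresh hnd
    simp only [List.foldl_cons]
    by_cases hC : C p
    · have hins := PySem.Dict.items_insert_of_not_contains d p.2 (hfresh p (by simp))
      have hrest : ∀ q ∈ l, (d.insert p.1 p.2).contains q.1 = false := by
        intro q hq
        rw [PySem.Dict.contains_insert]
        have hne : q.1 ≠ p.1 := by
          intro he
          have := hnd
          simp only [List.map_cons, List.nodup_cons] at this
          exact this.1 (he ▸ List.mem_map_of_mem hq)
        simp [hne, hfresh q (by simp [hq])]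
      rw [if_pos hC, ih _ hrest (by simpa using hnd.of_cons), hins]
      simp [hC]
    · rw [if_neg hC, ih _ (fun q hq => hfresh q (by simp [hq])) (by simpa using hnd.of_cons)]
      simp [hC]

theorem mem_foldl_cond_add {α : Type} [BEq α] [LawfulBEq α]
    (C : α × Int → Prop) [DecidablePred C] :
    ∀ (l : List (α × Int)) (s : PySem.Set α) (x : α),
      (x ∈ l.foldl (fun s p => if C p then PySem.Set.add s p.1 else s) s ↔
        x ∈ s ∨ ∃ p ∈ l, C p ∧ p.1 = x) := by
  intro l
  induction l with
  | nil => intro s x; simp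
  | cons p l ih =>
    intro s x
    simp only [List.foldl_cons]
    rw [ih]
    by_cases hC : C p
    · simp [hC, PySem.Set.mem_add]
      constructor
      · rintro ((h | h) | h)
        · exact Or.inl h
        · exact Or.inr (Or.inl h.symm)
        · exact Or.inr (Or.inr h)
      · rintro (h | h | h)
        · exact Or.inl (Or.inl h)
        · exact Or.inl (Or.inr h.symm)
        · exact Or.inr h
    · simp [hC]

theorem nodup_foldl_cond_add {α : Type} [BEq α] [LawfulBEq α]
    (C : α × Int → Prop) [DecidablePred C] :
    ∀ (l : List (α × Int)) (s : PySem.Set α), s.Nodup →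
      (l.foldl (fun s p => if C p then PySem.Set.add s p.1 else s) s).Nodup := by
  intro l
  induction l with
  | nil => intro s hs; exact hs
  | cons p l ih =>
    intro s hs
    simp only [List.foldl_cons]
    split_ifs with hC
    · exact ih _ (PySem.Set.nodup_add _ _ hs)
    · exact ih _ hs

theorem countP_or_disjoint {α : Type} (p q : α → Bool) :
    ∀ (l : List α), (∀ x ∈ l, ¬(p x = true ∧ q x = true)) →
      l.countP (fun x => p x || q x) = l.countP p + l.countP q := by
  intro l
  induction l with
  | nil => intro _; simp
  | cons x xs ih =>
    intro h
    rw [List.countP_cons, List.countP_cons, List.countP_cons,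
      ih (fun y hy => h y (by simp [hy]))]
    by_cases hp : p x = true
    · have hq : ¬ q x = true := fun hq => h x (by simp) ⟨hp, hq⟩
      simp [hp, hq]; omega
    · by_cases hq : q x = true <;> simp [hp, hq] <;> omega
-- the number of black neighbours of k, as a pure count over the offset list
def cntB (black : PySem.Set (Int × Int)) (k : Int × Int) : Nat :=
  neighborsA.countP (fun nb => decide ((k.1 + nb.1, k.2 + nb.2) ∈ black))

def RelAB (floor : PySem.Dict (Int × Int) Int) (black : PySem.Set (Int × Int)) : Prop :=
  floor.keys.Nodup ∧ black.Nodup ∧ (∀ t, t ∈ floor.keys ↔ t ∈ black) ∧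
    (∀ p ∈ floor.items, p.2 = 1)

theorem mem_keys_get_one {floor : PySem.Dict (Int × Int) Int}
    (hval : ∀ p ∈ floor.items, p.2 = 1) {k : Int × Int} (hk : k ∈ floor.keys) :
    floor.get? k = some 1 := by
  cases hg : floor.get? k with
  | none => exact absurd ((PySem.Dict.get?_eq_none_iff_not_mem_keys _ _).mp hg) (by simp [hk])
  | some v =>
    have := hval _ (PySem.Dict.mem_items_of_get?_eq_some _ hg)
    simp_all

theorem count_adjacents_eq {floor : PySem.Dict (Int × Int) Int} {black : PySem.Set (Int × Int)}
    (h : RelAB floor black) (t : Int × Int) :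
    count_adjacents t floor = (cntB black t : Int) := by
  obtain ⟨hknd, hbnd, hmem, hval⟩ := h
  unfold count_adjacents
  rw [PySem.List.foldl_congr_mem _ _
      (fun acc nb => if ((t.1 + nb.1, t.2 + nb.2) : Int × Int) ∈ black then acc + 1 else acc) 0 ?_]
  · rw [PySem.List.foldl_ite_add_one]
    simp [cntB]
  · intro acc nb _
    congr 1
    have : (floor.contains (t.1 + nb.1, t.2 + nb.2) = true ∧
        floor.getD (t.1 + nb.1, t.2 + nb.2) 0 = 1) ↔ (t.1 + nb.1, t.2 + nb.2) ∈ black := by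
      constructor
      · rintro ⟨hc, _⟩
        exact (hmem _).mp ((PySem.Dict.contains_iff_mem_keys _ _).mp hc)
      · intro hb
        have hky := (hmem _).mpr hb
        refine ⟨(PySem.Dict.contains_iff_mem_keys _ _).mpr hky, ?_⟩
        exact PySem.Dict.getD_of_get?_eq_some _ _ (mem_keys_get_one hval hky)
    simp [this]

theorem neg_mem_neighborsA {nb : Int × Int} (h : nb ∈ neighborsA) :
    ((-nb.1, -nb.2) : Int × Int) ∈ neighborsA := by
  fin_cases h <;> decide

theorem count_flat : ∀ (black : List (Int × Int)), black.Nodup → ∀ k : Int × Int,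
    (black.flatMap (fun t => offsetsB.map (fun o => (t.1 + o.1, t.2 + o.2)))).count k
      = cntB black k := by
  intro black
  induction black with
  | nil => intro _ k; simp [cntB]
  | cons b bs ih =>
    intro hnd k
    have hbs : b ∉ bs := (List.nodup_cons.mp hnd).1
    rw [List.flatMap_cons, List.count_append, ih (List.nodup_cons.mp hnd).2]
    have hperm : (offsetsB.map (fun o => ((-o.1, -o.2) : Int × Int))).Perm offsetsB := by decide
    have h1 : (offsetsB.map (fun o => ((b.1 + o.1, b.2 + o.2) : Int × Int))).count k
        = offsetsB.countP (fun nb => decide (((k.1 + nb.1, k.2 + nb.2) : Int × Int) = b)) := by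
      rw [List.count_eq_countP, List.countP_map]
      rw [← hperm.countP_eq, List.countP_map]
      have hbe : ∀ o : Int × Int, (((b.1 + -o.1, b.2 + -o.2) : Int × Int) == k)
          = decide (((k.1 + o.1, k.2 + o.2) : Int × Int) = b) := by
        intro o
        apply Bool.eq_iff_iff.mpr
        simp only [beq_iff_eq, decide_eq_true_eq]
        constructor <;> intro he <;>
          (rw [Prod.ext_iff] at he ⊢; obtain ⟨e1, e2⟩ := he; dsimp at *; exact ⟨by omega, by omega⟩)
      apply List.countP_congr
      intro o _
      simp only [Function.comp_apply]
      rw [hbe o]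
    rw [h1]
    show _ = cntB (b :: bs) k
    unfold cntB
    have h2 : neighborsA.countP (fun nb => decide ((k.1 + nb.1, k.2 + nb.2) ∈ b :: bs))
        = neighborsA.countP (fun nb => decide (((k.1 + nb.1, k.2 + nb.2) : Int × Int) = b)
            || decide ((k.1 + nb.1, k.2 + nb.2) ∈ bs)) := by
      apply List.countP_congr
      intro nb _
      simp [List.mem_cons]
    rw [h2, countP_or_disjoint _ _ _ ?_]
    · have : offsetsB = neighborsA := rfl
      rw [this]
    · intro nb _ h
      obtain ⟨hp, hq⟩ := h
      have hp' := of_decide_eq_true hp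
      have hq' := of_decide_eq_true hq
      rw [hp'] at hq'
      exact hbs hq'
-- the four stages of art_exhibit, named for the proofs (art_exhibit is definitionally their composition)
def nf1F (floor : PySem.Dict (Int × Int) Int) : PySem.Dict (Int × Int) Int :=
  floor.keys.foldl (fun nf tile =>
      neighborsA.foldl (fun nf nb => nf.insert (tile.1 + nb.1, tile.2 + nb.2) 0)
        (nf.insert tile 0))
    PySem.Dict.empty

def nf2F (floor : PySem.Dict (Int × Int) Int) : PySem.Dict (Int × Int) Int :=
  (nf1F floor).keys.foldl (fun nf tile =>
      nf.insert tile (if floor.contains tile = true then floor.getD tile 0 else 0)) (nf1F floor)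

def nf3F (floor : PySem.Dict (Int × Int) Int) : PySem.Dict (Int × Int) Int :=
  (nf2F floor).keys.foldl (fun nf tile =>
      if count_adjacents tile floor = 2 then nf.insert tile 1
      else if floor.contains tile = true ∧
          (count_adjacents tile floor = 0 ∨ count_adjacents tile floor > 2) then
        nf.insert tile 0
      else nf) (nf2F floor)

theorem art_exhibit_eq (floor : PySem.Dict (Int × Int) Int) :
    art_exhibit floor =
      (nf3F floor).items.foldl (fun nf p => if p.2 ≠ 0 then nf.insert p.1 p.2 else nf)
        PySem.Dict.empty := rfl

def CandL (floor : PySem.Dict (Int × Int) Int) : List (Int × Int) :=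
  floor.keys.flatMap (fun t => t :: neighborsA.map (fun nb => (t.1 + nb.1, t.2 + nb.2)))

theorem nf1F_eq (floor : PySem.Dict (Int × Int) Int) :
    nf1F floor = (CandL floor).foldl (fun d x => d.insert x (0 : Int)) PySem.Dict.empty := by
  unfold nf1F CandL
  rw [List.foldl_flatMap]
  simp [List.foldl_map]

theorem keys_nf1F (floor : PySem.Dict (Int × Int) Int) :
    (nf1F floor).keys = PySem.Set.ofList (CandL floor) := by
  rw [nf1F_eq, PySem.Dict.keys_foldl_insert (f := fun _ _ => (0 : Int))]
  simp [PySem.Dict.keys_empty, PySem.Set.update_nil_left]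

theorem keys_nf2F (floor : PySem.Dict (Int × Int) Int) :
    (nf2F floor).keys = (nf1F floor).keys := by
  unfold nf2F
  exact keys_foldl_pres _ (fun d t ht => PySem.Dict.keys_insert_of_contains d _
    ((PySem.Dict.contains_iff_mem_keys _ _).mpr ht)) _ _ (fun t ht => ht)

theorem get?_nf2F (floor : PySem.Dict (Int × Int) Int) (k : Int × Int) :
    (nf2F floor).get? k =
      if k ∈ (nf1F floor).keys then
        some (if floor.contains k = true then floor.getD k 0 else 0)
      else (nf1F floor).get? k := by
  unfold nf2F
  exact get?_foldl_insert_fn (fun t => if floor.contains t = true then floor.getD t 0 else 0) _ _ k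

theorem keys_nf3F (floor : PySem.Dict (Int × Int) Int) :
    (nf3F floor).keys = (nf2F floor).keys := by
  unfold nf3F
  refine keys_foldl_pres _ (fun d t ht => ?_) _ _ (fun t ht => ht)
  split_ifs <;>
    first
      | exact PySem.Dict.keys_insert_of_contains d _
          ((PySem.Dict.contains_iff_mem_keys _ _).mpr ht)
      | rfl

theorem get?_nf3F (floor : PySem.Dict (Int × Int) Int) (k : Int × Int) :
    (nf3F floor).get? k =
      if k ∈ (nf2F floor).keys ∧ count_adjacents k floor = 2 then some 1
      else if k ∈ (nf2F floor).keys ∧ (floor.contains k = true ∧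
          (count_adjacents k floor = 0 ∨ count_adjacents k floor > 2)) then some 0
      else (nf2F floor).get? k := by
  unfold nf3F
  exact get?_foldl_ite2
    (fun t => count_adjacents t floor = 2)
    (fun t => floor.contains t = true ∧
      (count_adjacents t floor = 0 ∨ count_adjacents t floor > 2)) 1 0 _ _ k

theorem items_art (floor : PySem.Dict (Int × Int) Int) :
    (art_exhibit floor).items = (nf3F floor).items.filter (fun p => decide (p.2 ≠ 0)) := by
  rw [art_exhibit_eq]
  rw [items_foldl_cond_insert_fresh (fun p => p.2 ≠ 0) _ _
    (fun p _ => PySem.Dict.contains_empty _) ?_]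
  · simp [PySem.Dict.empty]
  · have : (nf3F floor).items.map Prod.fst = (nf3F floor).keys := rfl
    rw [this, keys_nf3F, keys_nf2F, keys_nf1F]
    exact PySem.Set.nodup_ofList _
theorem mem_CandL {floor : PySem.Dict (Int × Int) Int} {k : Int × Int} :
    k ∈ CandL floor ↔
      k ∈ floor.keys ∨ ∃ t ∈ floor.keys, ∃ nb ∈ neighborsA, k = (t.1 + nb.1, t.2 + nb.2) := by
  unfold CandL
  simp only [List.mem_flatMap, List.mem_cons, List.mem_map]
  constructor
  · rintro ⟨t, ht, (rfl | ⟨nb, hnb, rfl⟩)⟩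
    · exact Or.inl ht
    · exact Or.inr ⟨t, ht, nb, hnb, rfl⟩
  · rintro (hk | ⟨t, ht, nb, hnb, rfl⟩)
    · exact ⟨k, hk, Or.inl rfl⟩
    · exact ⟨t, ht, Or.inr ⟨nb, hnb, rfl⟩⟩

theorem art_exhibit_spec {floor : PySem.Dict (Int × Int) Int} {black : PySem.Set (Int × Int)}
    (h : RelAB floor black) :
    (∀ k, (k ∈ (art_exhibit floor).keys ↔
        (cntB black k = 2 ∨ (k ∈ black ∧ cntB black k = 1))))
    ∧ (art_exhibit floor).keys.Nodup
    ∧ (∀ p ∈ (art_exhibit floor).items, p.2 = 1) := by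
  obtain ⟨hknd, hbnd, hmem, hval⟩ := h
  have hcontains : ∀ t, floor.contains t = true ↔ t ∈ black := fun t =>
    (PySem.Dict.contains_iff_mem_keys _ _).trans (hmem t)
  have hcnt : ∀ t, count_adjacents t floor = (cntB black t : Int) :=
    count_adjacents_eq ⟨hknd, hbnd, hmem, hval⟩
  have hK : (nf3F floor).keys = PySem.Set.ofList (CandL floor) := by
    rw [keys_nf3F, keys_nf2F, keys_nf1F]
  have hKnd : (nf3F floor).keys.Nodup := by rw [hK]; exact PySem.Set.nodup_ofList _
  have hkeysart : (art_exhibit floor).keys =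
      ((nf3F floor).items.filter (fun p => decide (p.2 ≠ 0))).map Prod.fst := by
    show (art_exhibit floor).items.map _ = _
    rw [items_art]
  have hget3 : ∀ k, k ∈ CandL floor →
      (nf3F floor).get? k = some (
        if count_adjacents k floor = 2 then 1
        else if floor.contains k = true ∧
            (count_adjacents k floor = 0 ∨ count_adjacents k floor > 2) then 0
        else if floor.contains k = true then floor.getD k 0 else 0) := by
    intro k hk
    have hk2 : k ∈ (nf2F floor).keys := by
      rw [keys_nf2F, keys_nf1F]; exact (PySem.Set.mem_ofList _ _).mpr hk
    have hk1 : k ∈ (nf1F floor).keys := by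
      rw [keys_nf1F]; exact (PySem.Set.mem_ofList _ _).mpr hk
    rw [get?_nf3F]
    by_cases h1 : count_adjacents k floor = 2
    · simp [hk2, h1]
    · by_cases h2 : floor.contains k = true ∧
          (count_adjacents k floor = 0 ∨ count_adjacents k floor > 2)
      · simp [hk2, h1, h2]
      · rw [if_neg (by simp [h1]), if_neg (by simp [h2]), get?_nf2F, if_pos hk1,
          if_neg h1, if_neg h2]
  -- value stored at any key present in art_exhibit's output is 1, and it forces the rule
  have hval1 : ∀ k v, ((k, v) ∈ (nf3F floor).items ∧ v ≠ 0) →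
      v = 1 ∧ (cntB black k = 2 ∨ (k ∈ black ∧ cntB black k = 1)) := by
    intro k v ⟨hmemit, hv⟩
    have hkC : k ∈ CandL floor := by
      have hkk : k ∈ (nf3F floor).keys := by
        show k ∈ (nf3F floor).items.map Prod.fst
        exact List.mem_map_of_mem (f := Prod.fst) hmemit
      rwa [hK, PySem.Set.mem_ofList] at hkk
    have hgv : (nf3F floor).get? k = some v :=
      (PySem.Dict.get?_eq_some_iff_mem_items _ _ _ hKnd).mpr hmemit
    rw [hget3 k hkC] at hgv
    have heq : (if count_adjacents k floor = 2 then 1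
        else if floor.contains k = true ∧
            (count_adjacents k floor = 0 ∨ count_adjacents k floor > 2) then 0
        else if floor.contains k = true then floor.getD k 0 else 0) = v :=
      Option.some.inj hgv
    have hm := hcnt k
    by_cases h1 : count_adjacents k floor = 2
    · rw [if_pos h1] at heq
      exact ⟨heq.symm, Or.inl (by omega)⟩
    · rw [if_neg h1] at heq
      by_cases h2 : floor.contains k = true ∧
          (count_adjacents k floor = 0 ∨ count_adjacents k floor > 2)
      · rw [if_pos h2] at heq; exact absurd heq.symm hv
      · rw [if_neg h2] at heq
        by_cases h3 : floor.contains k = true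
        · rw [if_pos h3] at heq
          have hone : floor.getD k 0 = 1 :=
            PySem.Dict.getD_of_get?_eq_some _ _
              (mem_keys_get_one hval ((PySem.Dict.contains_iff_mem_keys _ _).mp h3))
          refine ⟨by omega, Or.inr ⟨(hcontains _).mp h3, ?_⟩⟩
        <;> try skip
          have hnot : ¬(count_adjacents k floor = 0 ∨ count_adjacents k floor > 2) :=
            fun hx => h2 ⟨h3, hx⟩
          omega
        · rw [if_neg h3] at heq; exact absurd heq.symm hv
  have hmemart : ∀ k, k ∈ (art_exhibit floor).keys ↔
      (cntB black k = 2 ∨ (k ∈ black ∧ cntB black k = 1)) := by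
    intro k
    rw [hkeysart]
    simp only [List.mem_map, List.mem_filter, decide_eq_true_eq]
    constructor
    · rintro ⟨⟨k', v⟩, ⟨hmemit, hv⟩, rfl⟩
      exact (hval1 k' v ⟨hmemit, hv⟩).2
    · intro hcase
      have hkC : k ∈ CandL floor := by
        rcases hcase with h2 | ⟨hin, _⟩
        · have hpos : 0 < List.countP
              (fun nb => decide ((k.1 + nb.1, k.2 + nb.2) ∈ black)) neighborsA := by
            unfold cntB at h2; omega
          obtain ⟨nb, hnb, hp⟩ := List.countP_pos_iff.mp hpos
          have hbmem : ((k.1 + nb.1, k.2 + nb.2) : Int × Int) ∈ black := of_decide_eq_true hp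
          refine mem_CandL.mpr (Or.inr ⟨(k.1 + nb.1, k.2 + nb.2), (hmem _).mpr hbmem,
            (-nb.1, -nb.2), neg_mem_neighborsA hnb, ?_⟩)
          ext <;> dsimp <;> omega
        · exact mem_CandL.mpr (Or.inl ((hmem _).mpr hin))
      have hm := hcnt k
      have hv1 : (nf3F floor).get? k = some 1 := by
        rw [hget3 k hkC]
        rcases hcase with h2 | ⟨hin, h1c⟩
        · rw [if_pos (by omega)]
        · have hcin : floor.contains k = true := (hcontains _).mpr hin
          rw [if_neg (by omega), if_neg (by rintro ⟨_, hx⟩; omega), if_pos hcin,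
            PySem.Dict.getD_of_get?_eq_some _ _ (mem_keys_get_one hval ((hmem _).mpr hin))]
      exact ⟨(k, 1), ⟨(PySem.Dict.get?_eq_some_iff_mem_items _ _ _ hKnd).mp hv1, one_ne_zero⟩,
        rfl⟩
  refine ⟨hmemart, ?_, ?_⟩
  · rw [hkeysart]
    exact List.Nodup.sublist (List.Sublist.map Prod.fst List.filter_sublist) hKnd
  · intro p hp
    rw [items_art] at hp
    obtain ⟨hpmem, hpv⟩ := List.mem_filter.mp hp
    simp only [decide_eq_true_eq] at hpv
    exact (hval1 p.1 p.2 ⟨by cases p; exact hpmem, hpv⟩).1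
theorem stepB_spec (black : PySem.Set (Int × Int)) (hnd : black.Nodup) :
    (∀ k, k ∈ stepB black ↔ (cntB black k = 2 ∨ (k ∈ black ∧ cntB black k = 1)))
    ∧ (stepB black).Nodup := by
  have hflat : (black.foldl (fun counts t =>
        offsetsB.foldl (fun counts o =>
          counts.insert (t.1 + o.1, t.2 + o.2) (counts.getD (t.1 + o.1, t.2 + o.2) 0 + 1))
          counts) PySem.Dict.empty)
      = PySem.Dict.counter
          (black.flatMap (fun t => offsetsB.map (fun o => (t.1 + o.1, t.2 + o.2)))) := by
    rw [← PySem.Dict.foldl_insert_getD_add_one_eq_counter, List.foldl_flatMap]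
    simp [List.foldl_map]
  have hstep : stepB black =
      (PySem.Dict.counter
          (black.flatMap (fun t => offsetsB.map (fun o => (t.1 + o.1, t.2 + o.2))))).items.foldl
        (fun s p => if p.2 = 2 ∨ (p.2 = 1 ∧ p.1 ∈ black) then PySem.Set.add s p.1 else s)
        PySem.Set.empty := by
    unfold stepB
    rw [hflat]
  set FlatB := black.flatMap (fun t => offsetsB.map (fun o => (t.1 + o.1, t.2 + o.2))) with hF
  have hkc := PySem.Dict.nodup_keys_counter (κ := Int × Int) FlatB
  have hcount : ∀ k, FlatB.count k = cntB black k := count_flat black hnd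
  constructor
  · intro k
    rw [hstep, mem_foldl_cond_add (fun p => p.2 = 2 ∨ (p.2 = 1 ∧ p.1 ∈ black))]
    have hempty : (k ∈ (PySem.Set.empty : PySem.Set (Int × Int))) = False := by
      simp [PySem.Set.empty]
    rw [hempty]
    simp only [false_or]
    constructor
    · rintro ⟨⟨k', c⟩, hpm, hc, rfl⟩
      dsimp only at hc ⊢
      have hg : (PySem.Dict.counter FlatB).get? k' = some c :=
        (PySem.Dict.get?_eq_some_iff_mem_items _ _ _ hkc).mpr hpm
      have hgd : (PySem.Dict.counter FlatB).getD k' 0 = c :=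
        PySem.Dict.getD_of_get?_eq_some _ _ hg
      rw [PySem.Dict.getD_counter] at hgd
      have hcc := hcount k'
      rcases hc with hc | ⟨hc, hin⟩
      · left; omega
      · right; exact ⟨hin, by omega⟩
    · intro hcase
      have hpos : 0 < FlatB.count k := by
        have := hcount k
        rcases hcase with h2 | ⟨_, h1⟩ <;> omega
      have hmemF : k ∈ FlatB := List.count_pos_iff.mp hpos
      have hmemk : k ∈ (PySem.Dict.counter FlatB).keys := by
        rw [PySem.Dict.keys_counter]
        exact (PySem.Set.mem_ofList _ _).mpr hmemF
      obtain ⟨c, hg⟩ : ∃ c, (PySem.Dict.counter FlatB).get? k = some c := by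
        cases hg : (PySem.Dict.counter FlatB).get? k with
        | none =>
          exact absurd hmemk ((PySem.Dict.get?_eq_none_iff_not_mem_keys _ _).mp hg)
        | some c => exact ⟨c, rfl⟩
      have hgd : (PySem.Dict.counter FlatB).getD k 0 = c :=
        PySem.Dict.getD_of_get?_eq_some _ _ hg
      rw [PySem.Dict.getD_counter] at hgd
      have hcc := hcount k
      refine ⟨(k, c), (PySem.Dict.get?_eq_some_iff_mem_items _ _ _ hkc).mp hg, ?_, rfl⟩
      rcases hcase with h2 | ⟨hin, h1⟩
      · exact Or.inl (by omega)
      · exact Or.inr ⟨by omega, hin⟩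
  · rw [hstep]
    exact nodup_foldl_cond_add _ _ _ (by simp [PySem.Set.empty])

theorem step_rel {floor : PySem.Dict (Int × Int) Int} {black : PySem.Set (Int × Int)}
    (h : RelAB floor black) : RelAB (art_exhibit floor) (stepB black) := by
  obtain ⟨hA1, hA2, hA3⟩ := art_exhibit_spec h
  obtain ⟨hB1, hB2⟩ := stepB_spec black h.2.1
  exact ⟨hA2, hB2, fun t => (hA1 t).trans (hB1 t).symm, hA3⟩

theorem loop_rel : ∀ (l : List Int) (floor : PySem.Dict (Int × Int) Int)
    (black : PySem.Set (Int × Int)), RelAB floor black →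
    RelAB (l.foldl (fun f _ => art_exhibit f) floor) (l.foldl (fun b _ => stepB b) black) := by
  intro l
  induction l with
  | nil => intro floor black h; exact h
  | cons x xs ih =>
    intro floor black h
    simp only [List.foldl_cons]
    exact ih _ _ (step_rel h)

theorem init_loop : ∀ (lines : List String) (floor : PySem.Dict (Int × Int) Int)
    (black : PySem.Set (Int × Int)),
    (∀ l ∈ lines, wfLine l.toList = true) →
    floor.items = black.map (fun t => (t, (1 : Int))) → black.Nodup →
    ∃ floor' black',
      lines.foldl (fun acc line => acc.bind (fun floor =>
          (lineToCoord line.toList 0 0).map (fun c =>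
            if floor.contains c = true then floor.erase c else floor.insert c 1)))
        (some floor) = some floor' ∧
      lines.foldl (fun acc line => acc.bind (fun black =>
          (coordB line.toList 0 0).map (fun c =>
            if c ∈ black then PySem.Set.discard black c else PySem.Set.add black c)))
        (some black) = some black' ∧
      floor'.items = black'.map (fun t => (t, (1 : Int))) ∧ black'.Nodup := by
  intro lines
  induction lines with
  | nil => intro floor black _ hit hnd; exact ⟨floor, black, rfl, rfl, hit, hnd⟩
  | cons line rest ih =>
    intro floor black hwf hit hnd
    obtain ⟨c, hA, hB⟩ := parser_eq line.toList 0 0 (hwf line (by simp))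
    have hkeys : floor.keys = black := by
      show floor.items.map Prod.fst = black
      rw [hit, List.map_map]
      simp [Function.comp_def]
    have hcont : floor.contains c = true ↔ c ∈ black := by
      rw [PySem.Dict.contains_iff_mem_keys, hkeys]
    simp only [List.foldl_cons, Option.bind_some, hA, hB, Option.map_some]
    by_cases hc : c ∈ black
    · have hcc : floor.contains c = true := hcont.mpr hc
      rw [if_pos hcc, if_pos hc]
      refine ih _ _ (fun l hl => hwf l (by simp [hl])) ?_ (List.Nodup.filter _ hnd)
      show (floor.items.filter _) = _
      rw [hit, List.filter_map]
      rfl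
    · have hcc : floor.contains c = false := by
        cases hx : floor.contains c
        · rfl
        · exact absurd (hcont.mp hx) hc
      rw [if_neg (by simp [hcc]), if_neg hc]
      refine ih _ _ (fun l hl => hwf l (by simp [hl])) ?_ ?_
      · rw [PySem.Dict.items_insert_of_not_contains _ _ hcc,
          PySem.Set.add_of_not_mem hc, hit, List.map_append]
        rfl
      · rw [PySem.Set.add_of_not_mem hc]
        rw [List.nodup_append]
        refine ⟨hnd, List.nodup_singleton c, ?_⟩
        intro a ha b hb he
        have hb' : b = c := by simpa using hb
        subst hb'
        exact hc (he ▸ ha)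
-- ===== VERDICT (by name: the statement is the Claim_ definition above) =====
theorem turn_tiles_spec : Claim_equal_turn_tiles := by
  unfold Claim_equal_turn_tiles Spec_turn_tiles
  intro lines days _ hpre
  have hwf : ∀ l ∈ lines, wfLine l.toList = true := fun l hl =>
    (wfLine_iff _).mpr (hpre l hl)
  obtain ⟨floor', black', hA, hB, hit, hnd⟩ :=
    init_loop lines PySem.Dict.empty PySem.Set.empty hwf (by simp [PySem.Dict.empty, PySem.Set.empty]) (by simp [PySem.Set.empty])
  unfold turn_tiles turn_tiles_alt
  simp only [hA, hB]
  have hrel0 : RelAB floor' black' := by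
    have hkeys : floor'.keys = black' := by
      show floor'.items.map Prod.fst = black'
      rw [hit, List.map_map]
      simp [Function.comp_def]
    refine ⟨by rw [hkeys]; exact hnd, hnd, fun t => by rw [hkeys], ?_⟩
    intro p hp
    rw [hit] at hp
    obtain ⟨t, _, rfl⟩ := List.mem_map.mp hp
    rfl
  obtain ⟨hknd, hbnd, hmm, _⟩ := loop_rel (PySem.List.pyRange 0 days 1) floor' black' hrel0
  have hperm := (List.perm_ext_iff_of_nodup hknd hbnd).mpr hmm
  have hlen : ((PySem.List.pyRange 0 days 1).foldl (fun f _ => art_exhibit f) floor').size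
      = ((PySem.List.pyRange 0 days 1).foldl (fun b _ => stepB b) black').length := by
    have h1 : ((PySem.List.pyRange 0 days 1).foldl (fun f _ => art_exhibit f) floor').size
        = ((PySem.List.pyRange 0 days 1).foldl (fun f _ => art_exhibit f) floor').keys.length := by
      show _ = (List.map Prod.fst _).length
      rw [List.length_map]
      rfl
    rw [h1, hperm.length_eq]
  exact_mod_cast congrArg (Nat.cast (R := Int)) hlen
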